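-- pv_equiv track=rewrite | github.com/dilanasasanka/farmers-markets-backend | app/handlers/farmers_markets_handler.py | parse_slug_to_filters
-- ===== SOURCE A (Python) =====
-- def parse_slug_to_filters(slug_input):
--     filters = {}
--
--     # Define key phrases to split slug parts
--     key_phrases = ['-farmers-markets', '-that', '-have-', '-products', '-accept-', '-are-in-']
--
--     # Initialize slug parts with the full slug input
--     slug_parts = [slug_input]
--
--     # Split the slug into parts using each key phrase
--     for phrase in key_phrases:
--         new_slug_parts = []
--         for part in slug_parts:
--             if phrase in part:
--                 new_parts = part.split(phrase)
--                 new_slug_parts.extend(new_parts)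
--             else:
--                 new_slug_parts.append(part)
--         slug_parts = new_slug_parts
--
--     # Define mappings for each filter type
--     diversity_mapping = {
--         'native-american-owned-business': 'diversegroup_1',
--         'minority-owned-business': 'diversegroup_2',
--         'women-owned-business': 'diversegroup_3',
--         'veteran-owned-business': 'diversegroup_4',
--         'lgbtqia+-owned-business': 'diversegroup_5',
--         'disability-owned-business': 'diversegroup_6'
--     }
--
--     production_mapping = {
--         'organic-usda-certified': 'specialproductionmethods_1',
--         'non-certified-but-practicing-organic': 'specialproductionmethods_2',
--         'naturally-grown': 'specialproductionmethods_3',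
--         'gap-certified': 'specialproductionmethods_4',
--         'no-antibiotics': 'specialproductionmethods_5',
--         'non-gmo': 'specialproductionmethods_6',
--         'no-hormones': 'specialproductionmethods_7',
--         'no-pesticides': 'specialproductionmethods_8',
--         'grass-fed': 'specialproductionmethods_9',
--         'pasture-raised-free-range-animals': 'specialproductionmethods_10',
--         'humane-treatment-of-animals': 'specialproductionmethods_11',
--         'fair-labor-practices-living-wage-fair-trade': 'specialproductionmethods_12',
--         'kosher': 'specialproductionmethods_13',
--         'halal': 'specialproductionmethods_14'
--     }
--
--     payment_mapping = {
--         'barter': 'acceptedpayment_1',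
--         'volunteer-work': 'acceptedpayment_2',
--         'cash': 'acceptedpayment_3',
--         'personal-checks': 'acceptedpayment_4',
--         'commercial-checks-accounts': 'acceptedpayment_5',
--         'debit-card-credit-card': 'acceptedpayment_6',
--     }
--
--     fnap_mapping = {
--         'wic': 'FNAP_1',
--         'snap': 'FNAP_2',
--         'market-bucks': 'FNAP_3',
--         'wic-farmers-market': 'FNAP_4',
--         'senior-farmers-market-nutrition-program': 'FNAP_5',
--         'other-food-nutrition-assistance-programs': 'FNAP_888'
--     }
--
--     # Iterate through each part of the slug and map it to filter parameters
--     for part in slug_parts: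
--         if part in diversity_mapping:
--             filters['diversity'] = diversity_mapping[part]
--         elif part in production_mapping:
--             filters['production'] = production_mapping[part]
--         elif part in payment_mapping:
--             filters['payments'] = payment_mapping[part]
--         elif part in fnap_mapping:
--             filters['fnap'] = fnap_mapping[part]
--         elif part.strip():  # Check if part is not empty after removing leading/trailing spaces
--             # Assume it's the city-state part
--             filters['city_state'] = part.replace('-', ' ')  # Replace '-' with ' '
--
--     return filters
-- ===== SOURCE B (Python) =====
-- _KEY_PHRASES = ['-farmers-markets', '-that', '-have-', '-products', '-accept-', '-are-in-']
--
-- # one combined lookup table: token -> (filter name, filter value)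
-- _TABLE = {}
-- for _k, _v in {
--         'native-american-owned-business': 'diversegroup_1',
--         'minority-owned-business': 'diversegroup_2',
--         'women-owned-business': 'diversegroup_3',
--         'veteran-owned-business': 'diversegroup_4',
--         'lgbtqia+-owned-business': 'diversegroup_5',
--         'disability-owned-business': 'diversegroup_6'}.items():
--     _TABLE[_k] = ('diversity', _v)
-- for _k, _v in {
--         'organic-usda-certified': 'specialproductionmethods_1',
--         'non-certified-but-practicing-organic': 'specialproductionmethods_2',
--         'naturally-grown': 'specialproductionmethods_3',
--         'gap-certified': 'specialproductionmethods_4',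
--         'no-antibiotics': 'specialproductionmethods_5',
--         'non-gmo': 'specialproductionmethods_6',
--         'no-hormones': 'specialproductionmethods_7',
--         'no-pesticides': 'specialproductionmethods_8',
--         'grass-fed': 'specialproductionmethods_9',
--         'pasture-raised-free-range-animals': 'specialproductionmethods_10',
--         'humane-treatment-of-animals': 'specialproductionmethods_11',
--         'fair-labor-practices-living-wage-fair-trade': 'specialproductionmethods_12',
--         'kosher': 'specialproductionmethods_13',
--         'halal': 'specialproductionmethods_14'}.items():
--     _TABLE[_k] = ('production', _v)
-- for _k, _v in {
--         'barter': 'acceptedpayment_1',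
--         'volunteer-work': 'acceptedpayment_2',
--         'cash': 'acceptedpayment_3',
--         'personal-checks': 'acceptedpayment_4',
--         'commercial-checks-accounts': 'acceptedpayment_5',
--         'debit-card-credit-card': 'acceptedpayment_6'}.items():
--     _TABLE[_k] = ('payments', _v)
-- for _k, _v in {
--         'wic': 'FNAP_1',
--         'snap': 'FNAP_2',
--         'market-bucks': 'FNAP_3',
--         'wic-farmers-market': 'FNAP_4',
--         'senior-farmers-market-nutrition-program': 'FNAP_5',
--         'other-food-nutrition-assistance-programs': 'FNAP_888'}.items():
--     _TABLE[_k] = ('fnap', _v)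
--
--
-- def _tokens(s, phrases):
--     # depth-first: split off the first phrase, tokenize each piece by the rest
--     if not phrases:
--         return [s]
--     return [t for piece in s.split(phrases[0]) for t in _tokens(piece, phrases[1:])]
--
--
-- def parse_slug_to_filters(slug_input):
--     filters = {}
--     for part in _tokens(slug_input, _KEY_PHRASES):
--         hit = _TABLE.get(part)
--         if hit is not None:
--             filters[hit[0]] = hit[1]
--         elif part.strip():
--             filters['city_state'] = part.replace('-', ' ')
--     return filters
-- ===== Notes on version B (the rewrite author's own statement) =====
-- stated objective: alternative
-- what changed: Tokenization becomes a depth-first recursion over the phrase list (each piece is split by the remaining phrases) instead of A's phrase-by-phrase rebuild of the whole parts list, and the four mapping dicts are merged into one table consulted by a single .get() instead of the four-way membership chain.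
import Mathlib
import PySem

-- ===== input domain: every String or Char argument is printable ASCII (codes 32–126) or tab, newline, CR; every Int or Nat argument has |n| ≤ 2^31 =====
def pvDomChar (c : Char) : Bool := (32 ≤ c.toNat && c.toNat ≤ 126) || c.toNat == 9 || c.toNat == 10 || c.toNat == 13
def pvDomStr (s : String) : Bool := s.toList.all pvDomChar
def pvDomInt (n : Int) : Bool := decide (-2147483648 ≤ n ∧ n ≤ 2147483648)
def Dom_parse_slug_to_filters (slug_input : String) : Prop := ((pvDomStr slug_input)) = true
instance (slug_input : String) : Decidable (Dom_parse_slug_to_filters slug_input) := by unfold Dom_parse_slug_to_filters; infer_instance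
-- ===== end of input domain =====

-- B re-tokenizes by a depth-first recursion over the phrase list and classifies parts through one
-- combined table lookup instead of A's phrase-by-phrase parts rebuild and four-way membership chain
-- (objective: alternative decomposition, same cost).

-- ===== PORT A =====

-- Python str.split(sep) for a nonempty separator (exact: PySem.Chars.splitOn)
def pySplit (s sep : String) : List String :=
  (PySem.Chars.splitOn s.toList sep.toList).map String.ofList

def pvKeyPhrases : List String :=
  ["-farmers-markets", "-that", "-have-", "-products", "-accept-", "-are-in-"]

def pvDiversity : PySem.Dict String String := PySem.Dict.mk
  [("native-american-owned-business", "diversegroup_1"),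
   ("minority-owned-business", "diversegroup_2"),
   ("women-owned-business", "diversegroup_3"),
   ("veteran-owned-business", "diversegroup_4"),
   ("lgbtqia+-owned-business", "diversegroup_5"),
   ("disability-owned-business", "diversegroup_6")]

def pvProduction : PySem.Dict String String := PySem.Dict.mk
  [("organic-usda-certified", "specialproductionmethods_1"),
   ("non-certified-but-practicing-organic", "specialproductionmethods_2"),
   ("naturally-grown", "specialproductionmethods_3"),
   ("gap-certified", "specialproductionmethods_4"),
   ("no-antibiotics", "specialproductionmethods_5"),
   ("non-gmo", "specialproductionmethods_6"),
   ("no-hormones", "specialproductionmethods_7"),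
   ("no-pesticides", "specialproductionmethods_8"),
   ("grass-fed", "specialproductionmethods_9"),
   ("pasture-raised-free-range-animals", "specialproductionmethods_10"),
   ("humane-treatment-of-animals", "specialproductionmethods_11"),
   ("fair-labor-practices-living-wage-fair-trade", "specialproductionmethods_12"),
   ("kosher", "specialproductionmethods_13"),
   ("halal", "specialproductionmethods_14")]

def pvPayment : PySem.Dict String String := PySem.Dict.mk
  [("barter", "acceptedpayment_1"),
   ("volunteer-work", "acceptedpayment_2"),
   ("cash", "acceptedpayment_3"),
   ("personal-checks", "acceptedpayment_4"),
   ("commercial-checks-accounts", "acceptedpayment_5"),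
   ("debit-card-credit-card", "acceptedpayment_6")]

def pvFnap : PySem.Dict String String := PySem.Dict.mk
  [("wic", "FNAP_1"),
   ("snap", "FNAP_2"),
   ("market-bucks", "FNAP_3"),
   ("wic-farmers-market", "FNAP_4"),
   ("senior-farmers-market-nutrition-program", "FNAP_5"),
   ("other-food-nutrition-assistance-programs", "FNAP_888")]

-- one iteration of A's classification loop (the four-way elif chain)
def pvStepA (filters : PySem.Dict String String) (part : String) : PySem.Dict String String :=
  match pvDiversity.get? part with
  | some v => filters.insert "diversity" v
  | none =>
    match pvProduction.get? part with
    | some v => filters.insert "production" v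
    | none =>
      match pvPayment.get? part with
      | some v => filters.insert "payments" v
      | none =>
        match pvFnap.get? part with
        | some v => filters.insert "fnap" v
        | none =>
          if PySem.Str.strip part ≠ "" then
            filters.insert "city_state" (PySem.Str.replace part "-" " ")
          else filters

def parse_slug_to_filters (slug_input : String) : List (String × String) :=
  let slug_parts := pvKeyPhrases.foldl
    (fun parts phrase => parts.foldl
      (fun acc part =>
        if PySem.Str.isIn phrase part then acc ++ pySplit part phrase
        else acc ++ [part]) [])
    [slug_input]
  (slug_parts.foldl pvStepA PySem.Dict.empty).items

-- ===== PORT B =====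

-- combined lookup table: token -> (filter name, filter value)
def pvTable : PySem.Dict String (String × String) := PySem.Dict.mk
  [("native-american-owned-business", ("diversity", "diversegroup_1")),
   ("minority-owned-business", ("diversity", "diversegroup_2")),
   ("women-owned-business", ("diversity", "diversegroup_3")),
   ("veteran-owned-business", ("diversity", "diversegroup_4")),
   ("lgbtqia+-owned-business", ("diversity", "diversegroup_5")),
   ("disability-owned-business", ("diversity", "diversegroup_6")),
   ("organic-usda-certified", ("production", "specialproductionmethods_1")),
   ("non-certified-but-practicing-organic", ("production", "specialproductionmethods_2")),
   ("naturally-grown", ("production", "specialproductionmethods_3")),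
   ("gap-certified", ("production", "specialproductionmethods_4")),
   ("no-antibiotics", ("production", "specialproductionmethods_5")),
   ("non-gmo", ("production", "specialproductionmethods_6")),
   ("no-hormones", ("production", "specialproductionmethods_7")),
   ("no-pesticides", ("production", "specialproductionmethods_8")),
   ("grass-fed", ("production", "specialproductionmethods_9")),
   ("pasture-raised-free-range-animals", ("production", "specialproductionmethods_10")),
   ("humane-treatment-of-animals", ("production", "specialproductionmethods_11")),
   ("fair-labor-practices-living-wage-fair-trade", ("production", "specialproductionmethods_12")),
   ("kosher", ("production", "specialproductionmethods_13")),
   ("halal", ("production", "specialproductionmethods_14")),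
   ("barter", ("payments", "acceptedpayment_1")),
   ("volunteer-work", ("payments", "acceptedpayment_2")),
   ("cash", ("payments", "acceptedpayment_3")),
   ("personal-checks", ("payments", "acceptedpayment_4")),
   ("commercial-checks-accounts", ("payments", "acceptedpayment_5")),
   ("debit-card-credit-card", ("payments", "acceptedpayment_6")),
   ("wic", ("fnap", "FNAP_1")),
   ("snap", ("fnap", "FNAP_2")),
   ("market-bucks", ("fnap", "FNAP_3")),
   ("wic-farmers-market", ("fnap", "FNAP_4")),
   ("senior-farmers-market-nutrition-program", ("fnap", "FNAP_5")),
   ("other-food-nutrition-assistance-programs", ("fnap", "FNAP_888"))]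

-- depth-first tokenization: split off the first phrase, tokenize each piece by the rest
def pvTokens (s : String) : List String → List String
  | [] => [s]
  | p :: ps => (pySplit s p).flatMap (fun piece => pvTokens piece ps)

-- one iteration of B's classification loop (single combined-table lookup)
def pvStepB (filters : PySem.Dict String String) (part : String) : PySem.Dict String String :=
  match pvTable.get? part with
  | some hit => filters.insert hit.1 hit.2
  | none =>
    if PySem.Str.strip part ≠ "" then
      filters.insert "city_state" (PySem.Str.replace part "-" " ")
    else filters

def parse_slug_to_filters_alt (slug_input : String) : List (String × String) :=
  ((pvTokens slug_input pvKeyPhrases).foldl pvStepB PySem.Dict.empty).items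

-- ===== PRECONDITION & SPEC =====
def Spec_parse_slug_to_filters (slug_input : String) (out : List (String × String)) : Prop := out = parse_slug_to_filters_alt slug_input
instance (slug_input : String) (out : List (String × String)) : Decidable (Spec_parse_slug_to_filters slug_input out) := by unfold Spec_parse_slug_to_filters; infer_instance

-- ===== CLAIM (what is proved, stated in full; the proofs are below) =====
def Claim_equal_parse_slug_to_filters : Prop := ∀ (slug_input : String), Dom_parse_slug_to_filters slug_input → Spec_parse_slug_to_filters slug_input (parse_slug_to_filters slug_input)

-- ===== LEMMAS AND PROOFS =====

-- splitOn.go never matches a separator that is not an infix of the remaining input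
theorem pvSplitOn_go_no_sep (sep : List Char) :
    ∀ (fuel : Nat) (l cur : List Char) (acc : List (List Char)),
      ¬ sep <:+: l →
      PySem.Chars.splitOn.go sep fuel l cur acc = acc.reverse ++ [cur.reverse ++ l]
  | 0, l, cur, acc, h => by simp [PySem.Chars.splitOn.go]
  | fuel+1, [], cur, acc, h => by simp [PySem.Chars.splitOn.go]
  | fuel+1, c :: rest, cur, acc, h => by
    rw [PySem.Chars.splitOn.go]
    split
    · exact absurd (List.IsPrefix.isInfix (List.isPrefixOf_iff_prefix.mp (by assumption))) h
    · rw [pvSplitOn_go_no_sep sep fuel rest (c :: cur) acc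
        (fun hi => h (hi.trans (List.suffix_cons c rest).isInfix))]
      simp

-- Python s.split(sep) returns [s] when sep does not occur in s
theorem pySplit_of_not_isIn (s sep : String) (h : PySem.Str.isIn sep s = false) :
    pySplit s sep = [s] := by
  unfold pySplit PySem.Chars.splitOn
  rw [pvSplitOn_go_no_sep _ _ _ _ _ (by
    simpa [PySem.Chars.isIn_eq_false_iff] using h)]
  simp

-- A's inner rebuild of the parts list is a flatMap of per-part splitting
theorem pvInner_eq_flatMap (phrase : String) (parts : List String) :
    parts.foldl
      (fun acc part =>
        if PySem.Str.isIn phrase part then acc ++ pySplit part phrase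
        else acc ++ [part]) []
    = parts.flatMap (fun part => pySplit part phrase) := by
  have hfun : (fun (acc : List String) part =>
      if PySem.Str.isIn phrase part then acc ++ pySplit part phrase else acc ++ [part])
      = fun acc part => acc ++ pySplit part phrase := by
    funext acc part
    by_cases hc : PySem.Str.isIn phrase part = true
    · rw [if_pos hc]
    · rw [if_neg hc, pySplit_of_not_isIn part phrase (Bool.eq_false_iff.mpr hc)]
  rw [hfun, PySem.List.foldl_append_eq_flatMap]
  simp

-- A's breadth-first phrase-by-phrase splitting equals B's depth-first recursion
theorem pvTokens_foldl (ps : List String) :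
    ∀ (P : List String),
      ps.foldl
        (fun parts phrase => parts.foldl
          (fun acc part =>
            if PySem.Str.isIn phrase part then acc ++ pySplit part phrase
            else acc ++ [part]) []) P
      = P.flatMap (fun s => pvTokens s ps) := by
  induction ps with
  | nil => intro P; simp [pvTokens]
  | cons p ps ih =>
    intro P
    rw [List.foldl_cons, ih, pvInner_eq_flatMap]
    simp [pvTokens, List.flatMap_assoc]

-- the four-way elif chain and the combined-table lookup classify every part identically
theorem pvGet?_mk_append {κ ν : Type} [BEq κ] (l1 l2 : List (κ × ν)) (x : κ) :
    (PySem.Dict.mk (l1 ++ l2)).get? x = ((PySem.Dict.mk l1).get? x).or ((PySem.Dict.mk l2).get? x) := by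
  induction l1 with
  | nil => simp [PySem.Dict.get?]
  | cons p l1 ih =>
    rw [List.cons_append]
    cases p with
    | mk k v =>
      rw [PySem.Dict.get?_mk_cons, PySem.Dict.get?_mk_cons]
      by_cases h : (k == x) = true
      · simp [h]
      · simp [h, ih]

theorem pvGet?_mk_mapval {κ ν ν' : Type} [BEq κ] (l : List (κ × ν)) (f : ν → ν') (x : κ) :
    (PySem.Dict.mk (l.map (fun p => (p.1, f p.2)))).get? x = ((PySem.Dict.mk l).get? x).map f := by
  induction l with
  | nil => simp [PySem.Dict.get?]
  | cons p l ih =>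
    rw [List.map_cons, PySem.Dict.get?_mk_cons, PySem.Dict.get?_mk_cons]
    by_cases h : (p.1 == x) = true
    · simp [h]
    · simp [h, ih]

-- the combined table is the four mapping dicts, tagged with their filter name, laid end to end
theorem pvTable_get? (part : String) :
    pvTable.get? part =
      ((pvDiversity.get? part).map (fun v => ("diversity", v))).or
      (((pvProduction.get? part).map (fun v => ("production", v))).or
      (((pvPayment.get? part).map (fun v => ("payments", v))).or
      ((pvFnap.get? part).map (fun v => ("fnap", v))))) := by
  have h : pvTable = PySem.Dict.mk
      (pvDiversity.items.map (fun p => (p.1, ("diversity", p.2)))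
        ++ (pvProduction.items.map (fun p => (p.1, ("production", p.2)))
        ++ (pvPayment.items.map (fun p => (p.1, ("payments", p.2)))
        ++ pvFnap.items.map (fun p => (p.1, ("fnap", p.2)))))) := by rfl
  rw [h, pvGet?_mk_append, pvGet?_mk_append, pvGet?_mk_append,
    pvGet?_mk_mapval, pvGet?_mk_mapval, pvGet?_mk_mapval, pvGet?_mk_mapval]

theorem pvStep_eq : pvStepA = pvStepB := by
  funext f part
  unfold pvStepA pvStepB
  rw [pvTable_get? part]
  cases pvDiversity.get? part <;> cases pvProduction.get? part <;>
    cases pvPayment.get? part <;> cases pvFnap.get? part <;> rfl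

-- ===== VERDICT (by name: the statement is the Claim_ definition above) =====
theorem parse_slug_to_filters_spec : Claim_equal_parse_slug_to_filters := by
  intro slug_input _
  unfold Spec_parse_slug_to_filters parse_slug_to_filters parse_slug_to_filters_alt
  rw [pvTokens_foldl, pvStep_eq]
  simp
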